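-- pv_equiv track=rewrite | github.com/AviNoah/Leetcode | problems/prob_2491.py | set_approach
-- ===== SOURCE A (Python) =====
-- def set_approach(skill: list[int]) -> int:
--     # The first team should always be the best and the worst participants
--     target = max(skill) + min(skill)  # O(n)
--
--     # Pick available partner from the partner dict if available
--     partner_map: dict[int, int] = dict()
--     product = 0
--
--     # O(n)
--     for num in skill:
--         needed = target - num
--
--         if needed in partner_map and partner_map[needed] > 0:
--             partner_map[needed] -= 1
--             product += needed * num
--         else:
--             # Add as an available partner
--             if num not in partner_map:
--                 partner_map[num] = 0
--
--             partner_map[num] += 1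
--
--     return product if all([val == 0 for val in partner_map.values()]) else -1
-- ===== SOURCE B (Python) =====
-- def set_approach(skill: list[int]) -> int:
--     # Count-and-verify: build a frequency table once, check every element's
--     # complement count matches, and compute the product via a closed-form sum.
--     target = max(skill) + min(skill)
--     cnt = {}
--     for x in skill:
--         cnt[x] = cnt.get(x, 0) + 1
--     for x in skill:
--         y = target - x
--         if cnt.get(y, 0) != cnt[x] or (x == y and cnt[x] % 2 == 1):
--             return -1
--     return sum(x * (target - x) for x in skill) // 2
-- ===== Notes on version B (the rewrite author's own statement) =====
-- stated objective: alternative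
-- what changed: A pairs elements greedily in one sequential pass over a mutable availability dict and accumulates per-pair products; B builds a frequency counter once, verifies for every element that its complement's count matches (with an evenness check for the self-complement value), and computes the product as sum(x*(target-x))//2 in closed form.
import Mathlib
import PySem

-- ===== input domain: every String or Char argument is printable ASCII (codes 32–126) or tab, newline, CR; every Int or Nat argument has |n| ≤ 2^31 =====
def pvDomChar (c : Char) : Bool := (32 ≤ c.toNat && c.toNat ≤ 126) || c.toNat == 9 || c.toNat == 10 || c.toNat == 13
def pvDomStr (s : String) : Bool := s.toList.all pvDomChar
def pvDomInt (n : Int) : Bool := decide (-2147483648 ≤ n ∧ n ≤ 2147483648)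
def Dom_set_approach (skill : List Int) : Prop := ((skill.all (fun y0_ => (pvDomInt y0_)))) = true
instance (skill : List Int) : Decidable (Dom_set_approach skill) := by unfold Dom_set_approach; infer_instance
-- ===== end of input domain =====

-- B replaces A's sequential greedy pairing dict with a frequency counter checked per element
-- plus a closed-form product sum (objective: alternative; A raises ValueError on [], excluded by Pre_).


-- ===== PORT A =====
/-- one iteration of A's `for num in skill` loop over the state (partner_map, product) -/
def stepA (target : Int) (st : PySem.Dict Int Int × Int) (num : Int) : PySem.Dict Int Int × Int :=
  let d := st.1
  let needed := target - num
  if d.contains needed && decide (0 < d.getD needed 0) then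
    (d.modify needed 0 (fun v => v - 1), st.2 + needed * num)
  else
    ((d.setdefault num 0).modify num 0 (fun v => v + 1), st.2)

def set_approach (skill : List Int) : Int :=
  match PySem.List.max? skill (fun x => x), PySem.List.min? skill (fun x => x) with
  | some mx, some mn =>
    let target := mx + mn
    let r := skill.foldl (stepA target) (PySem.Dict.empty, 0)
    if r.1.values.all (fun v => v == 0) then r.2 else -1
  | _, _ => 0  -- unreachable under Pre_: Python raises ValueError on []

-- ===== PORT B =====
/-- B's second loop: early-return check that every element's complement count matches -/
def altCheck (target : Int) (cnt : PySem.Dict Int Int) : List Int → Bool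
  | [] => true
  | x :: rest =>
    if cnt.getD (target - x) 0 ≠ cnt.getD x 0 ∨ (x = target - x ∧ PySem.Int.mod (cnt.getD x 0) 2 = 1) then
      false
    else altCheck target cnt rest

def set_approach_alt (skill : List Int) : Int :=
  match PySem.List.max? skill (fun x => x) with
  | none => 0  -- unreachable under Pre_: Python raises ValueError on []
  | some mx =>
    match PySem.List.min? skill (fun x => x) with
    | none => 0  -- unreachable under Pre_
    | some mn =>
      let target := mx + mn
      let cnt := skill.foldl (fun (d : PySem.Dict Int Int) x => d.insert x (d.getD x 0 + 1)) PySem.Dict.empty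
      if altCheck target cnt skill then
        PySem.Int.floordiv ((skill.map (fun x => x * (target - x))).sum) 2
      else -1

-- ===== PRECONDITION & SPEC =====
-- Pre_ excludes only the empty list, on which A's max() raises ValueError (B's max() raises too).
def Pre_set_approach (skill : List Int) : Prop := skill ≠ []
instance (skill : List Int) : Decidable (Pre_set_approach skill) := by unfold Pre_set_approach; infer_instance
def pvWitness_set_approach : List Int := [1, 5, 3, 3]

def Spec_set_approach (skill : List Int) (out : Int) : Prop := out = set_approach_alt skill
instance (skill : List Int) (out : Int) : Decidable (Spec_set_approach skill out) := by unfold Spec_set_approach; infer_instance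

-- ===== CLAIM (what is proved, stated in full; the proofs are below) =====
def Claim_equal_set_approach : Prop := ∀ (skill : List Int), Dom_set_approach skill → Pre_set_approach skill → Spec_set_approach skill (set_approach skill)

-- ===== LEMMAS AND PROOFS =====


def leftv (t : Int) (p : List Int) (v : Int) : Int :=
  if v + v = t then (p.count v : Int) % 2
  else max ((p.count v : Int) - (p.count (t - v) : Int)) 0

def wk (t : Int) (d : PySem.Dict Int Int) : Int :=
  (d.keys.map (fun k => k * (t - k) * d.getD k 0)).sum

def sprod (t : Int) (p : List Int) : Int :=
  (p.map (fun a => a * (t - a))).sum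

lemma leftv_nonneg (t : Int) (p : List Int) (v : Int) : 0 ≤ leftv t p v := by
  unfold leftv; split_ifs <;> [exact Int.emod_nonneg _ (by norm_num); exact le_max_right _ _]

lemma count_append_singleton (p : List Int) (num w : Int) :
    ((p ++ [num]).count w : Int) = (p.count w : Int) + (if w = num then 1 else 0) := by
  rcases eq_or_ne w num with h | h
  · subst h; simp [List.count_append]
  · simp [List.count_append, h, Ne.symm h]

lemma sprod_append_singleton (t : Int) (p : List Int) (num : Int) :
    sprod t (p ++ [num]) = sprod t p + num * (t - num) := by
  simp [sprod]

lemma sum_map_update {l : List Int} (hnd : l.Nodup) {a : Int} (ha : a ∈ l)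
    (f g : Int → Int) (h : ∀ x ∈ l, x ≠ a → f x = g x) :
    (l.map f).sum = (l.map g).sum + (f a - g a) := by
  induction l with
  | nil => cases ha
  | cons y ys ih =>
    rcases List.mem_cons.mp ha with rfl | hmem
    · have hys : ∀ x ∈ ys, f x = g x := by
        intro x hx
        exact h x (List.mem_cons_of_mem _ hx) (fun hxa => (List.nodup_cons.mp hnd).1 (hxa ▸ hx))
      simp [List.map_cons, List.sum_cons, List.map_congr_left hys]
      ring
    · have hya : y ≠ a := fun hya => (List.nodup_cons.mp hnd).1 (hya ▸ hmem)
      have := ih (List.nodup_cons.mp hnd).2 hmem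
        (fun x hx hxa => h x (List.mem_cons_of_mem _ hx) hxa)
      simp [List.map_cons, List.sum_cons, this, h y (List.mem_cons_self) hya]
      ring

lemma leftv_append_pair (t num : Int) (p : List Int) (hb : 0 < leftv t p (t - num)) (v : Int) :
    leftv t (p ++ [num]) v = if v = t - num then leftv t p (t - num) - 1 else leftv t p v := by
  unfold leftv at hb ⊢
  rw [show t - (t - num) = num by ring] at hb
  by_cases hv1 : v = t - num
  · subst hv1
    rw [if_pos rfl, count_append_singleton, show t - (t - num) = num by ring,
      count_append_singleton, if_pos rfl]
    by_cases hm : (t - num) + (t - num) = t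
    · rw [if_pos hm] at hb ⊢
      rw [if_pos hm, if_pos (show t - num = num by omega)]
      omega
    · rw [if_neg hm] at hb ⊢
      rw [if_neg hm, if_neg (show ¬ t - num = num by omega)]
      omega
  · rw [if_neg hv1]
    by_cases hv2 : v = num
    · subst hv2
      have hm : ¬ (v + v = t) := by omega
      have hmn : ¬ ((t - v) + (t - v) = t) := by omega
      rw [if_neg hmn] at hb
      rw [if_neg hm, if_neg hm, count_append_singleton, count_append_singleton,
        if_pos rfl, if_neg (show ¬ t - v = v by omega)]
      omega
    · rw [count_append_singleton, count_append_singleton, if_neg hv2,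
        if_neg (show ¬ t - v = num by omega)]
      omega

lemma leftv_append_add (t num : Int) (p : List Int) (hb0 : leftv t p (t - num) = 0) (v : Int) :
    leftv t (p ++ [num]) v = if v = num then leftv t p num + 1 else leftv t p v := by
  unfold leftv at hb0 ⊢
  rw [show t - (t - num) = num by ring] at hb0
  by_cases hv2 : v = num
  · subst hv2
    rw [if_pos rfl, count_append_singleton, if_pos rfl]
    by_cases hm : v + v = t
    · rw [if_pos (show t - v + (t - v) = t by omega), show t - v = v by omega] at hb0
      rw [if_pos hm, if_pos hm]
      omega
    · rw [if_neg (show ¬ (t - v + (t - v) = t) by omega)] at hb0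
      rw [if_neg hm, if_neg hm, count_append_singleton,
        if_neg (show ¬ t - v = v by omega)]
      omega
  · rw [if_neg hv2]
    by_cases hv1 : v = t - num
    · subst hv1
      rw [if_neg (show ¬ (t - num + (t - num) = t) by omega)] at hb0
      rw [if_neg (show ¬ (t - num + (t - num) = t) by omega),
        if_neg (show ¬ (t - num + (t - num) = t) by omega)]
      rw [count_append_singleton, show t - (t - num) = num by ring,
        count_append_singleton, if_pos rfl, if_neg (show ¬ t - num = num by omega)]
      omega
    · rw [count_append_singleton, count_append_singleton, if_neg hv2,
        if_neg (show ¬ t - v = num by omega)]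
      omega

lemma step_inv (t : Int) (p : List Int) (num : Int) (d : PySem.Dict Int Int) (prod : Int)
    (h1 : ∀ v, d.getD v 0 = leftv t p v) (hk : d.keys.Nodup)
    (h2 : 2 * prod + wk t d = sprod t p) :
    (∀ v, (stepA t (d, prod) num).1.getD v 0 = leftv t (p ++ [num]) v) ∧
      (stepA t (d, prod) num).1.keys.Nodup ∧
      2 * (stepA t (d, prod) num).2 + wk t (stepA t (d, prod) num).1 = sprod t (p ++ [num]) := by
  have hCiff : (d.contains (t - num) && decide (0 < d.getD (t - num) 0)) = true ↔
      0 < leftv t p (t - num) := by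
    constructor
    · intro hc
      have hh := (Bool.and_eq_true _ _).mp hc
      have h0 := of_decide_eq_true hh.2
      rwa [h1] at h0
    · intro h0
      have hg : 0 < d.getD (t - num) 0 := by rw [h1]; exact h0
      have hcon : d.contains (t - num) = true := by
        by_contra hc
        rw [PySem.Dict.getD_of_not_contains d 0 (Bool.not_eq_true _ ▸ (by simpa using hc))] at hg
        omega
      simp [hcon, hg]
  by_cases hb : 0 < leftv t p (t - num)
  · -- pairing branch
    have hC : (d.contains (t - num) && decide (0 < d.getD (t - num) 0)) = true := hCiff.mpr hb
    have hstep : stepA t (d, prod) num =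
        (d.modify (t - num) 0 (fun v => v - 1), prod + (t - num) * num) := by
      simp [stepA, hC]
    rw [hstep]
    have hconN : d.contains (t - num) = true := ((Bool.and_eq_true _ _).mp hC).1
    have hkeys : (d.modify (t - num) 0 (fun v => v - 1)).keys = d.keys := by
      rw [PySem.Dict.keys_modify, PySem.Dict.keys_insert_of_contains d _ hconN]
    refine ⟨?_, ?_, ?_⟩
    · intro v
      rw [PySem.Dict.getD_modify, h1, h1, leftv_append_pair t num p hb v]
    · rwa [hkeys]
    · have hmem : (t - num) ∈ d.keys := (PySem.Dict.contains_iff_mem_keys d _).mp hconN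
      have hwk : wk t (d.modify (t - num) 0 (fun v => v - 1)) = wk t d - (t - num) * num := by
        unfold wk
        rw [hkeys]
        rw [sum_map_update hk hmem _ (fun k => k * (t - k) * d.getD k 0)
          (fun x _ hx => by simp only [PySem.Dict.getD_modify, if_neg hx])]
        simp
        ring
      rw [hwk, sprod_append_singleton]
      have hrw : (t - num) * num = num * (t - num) := by ring
      simp only []
      linarith [h2]
  · -- add-as-partner branch
    have hC : (d.contains (t - num) && decide (0 < d.getD (t - num) 0)) = false := by
      rw [← Bool.not_eq_true]; simpa using fun hc => hb (hCiff.mp hc)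
    have hb0 : leftv t p (t - num) = 0 :=
      le_antisymm (by omega) (leftv_nonneg t p (t - num))
    have hstep : stepA t (d, prod) num =
        ((d.setdefault num 0).modify num 0 (fun v => v + 1), prod) := by
      simp [stepA, hC]
    rw [hstep]
    have hgd : ∀ v, ((d.setdefault num 0).modify num 0 (fun v => v + 1)).getD v 0 =
        if v = num then d.getD num 0 + 1 else d.getD v 0 := by
      intro v
      by_cases hcn : d.contains num = true
      · rw [PySem.Dict.setdefault_of_contains d 0 hcn, PySem.Dict.getD_modify]
      · have hcn' : d.contains num = false := by simpa using hcn
        rw [PySem.Dict.setdefault_of_not_contains d 0 hcn', PySem.Dict.getD_modify]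
        rw [PySem.Dict.getD_insert, if_pos rfl, PySem.Dict.getD_of_not_contains d 0 hcn']
        split_ifs with hv
        · rfl
        · rw [PySem.Dict.getD_insert, if_neg hv]
    refine ⟨?_, ?_, ?_⟩
    · intro v
      rw [hgd v, leftv_append_add t num p hb0 v]
      split_ifs with hv <;> rw [h1]
    · by_cases hcn : d.contains num = true
      · rw [PySem.Dict.setdefault_of_contains d 0 hcn, PySem.Dict.keys_modify,
          PySem.Dict.keys_insert_of_contains d _ hcn]
        exact hk
      · have hcn' : d.contains num = false := by simpa using hcn
        rw [PySem.Dict.setdefault_of_not_contains d 0 hcn', PySem.Dict.keys_modify,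
          PySem.Dict.keys_insert_of_contains _ _ (PySem.Dict.contains_insert_self d num 0),
          PySem.Dict.keys_insert_of_not_contains d _ hcn']
        refine List.Nodup.append hk (List.nodup_singleton _) ?_
        simp only [List.disjoint_singleton]
        exact fun hmem' => absurd ((PySem.Dict.contains_iff_mem_keys d num).mpr hmem') (by simp [hcn'])
    · have hwk : wk t ((d.setdefault num 0).modify num 0 (fun v => v + 1)) =
          wk t d + num * (t - num) := by
        by_cases hcn : d.contains num = true
        · unfold wk
          have hkeq : ((d.setdefault num 0).modify num 0 (fun v => v + 1)).keys = d.keys := by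
            rw [PySem.Dict.setdefault_of_contains d 0 hcn, PySem.Dict.keys_modify,
              PySem.Dict.keys_insert_of_contains d _ hcn]
          rw [hkeq]
          have hmem : num ∈ d.keys := (PySem.Dict.contains_iff_mem_keys d _).mp hcn
          rw [sum_map_update hk hmem _ (fun k => k * (t - k) * d.getD k 0)
            (fun x _ hx => by simp only [hgd x, if_neg hx])]
          simp [hgd num]
          ring
        · have hcn' : d.contains num = false := by simpa using hcn
          unfold wk
          have hkeq : ((d.setdefault num 0).modify num 0 (fun v => v + 1)).keys = d.keys ++ [num] := by
            rw [PySem.Dict.setdefault_of_not_contains d 0 hcn', PySem.Dict.keys_modify,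
              PySem.Dict.keys_insert_of_contains _ _ (PySem.Dict.contains_insert_self d num 0),
              PySem.Dict.keys_insert_of_not_contains d _ hcn']
          rw [hkeq, List.map_append, List.sum_append]
          have hnm : num ∉ d.keys := fun hmem =>
            absurd ((PySem.Dict.contains_iff_mem_keys d num).mpr hmem) (by simp [hcn'])
          have hcongr : ∀ x ∈ d.keys,
              x * (t - x) * ((d.setdefault num 0).modify num 0 (fun v => v + 1)).getD x 0 =
              x * (t - x) * d.getD x 0 := by
            intro x hx
            rw [hgd x, if_neg (fun hxe => hnm (by rw [hxe] at hx; exact hx))]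
          rw [List.map_congr_left hcongr]
          simp [hgd num, PySem.Dict.getD_of_not_contains d 0 hcn']
      rw [hwk, sprod_append_singleton]
      linarith [h2]


lemma fold_inv (t : Int) (rest : List Int) : ∀ (p : List Int) (d : PySem.Dict Int Int) (prod : Int),
    (∀ v, d.getD v 0 = leftv t p v) → d.keys.Nodup → 2 * prod + wk t d = sprod t p →
    (∀ v, (rest.foldl (stepA t) (d, prod)).1.getD v 0 = leftv t (p ++ rest) v) ∧
      (rest.foldl (stepA t) (d, prod)).1.keys.Nodup ∧
      2 * (rest.foldl (stepA t) (d, prod)).2 + wk t (rest.foldl (stepA t) (d, prod)).1 = sprod t (p ++ rest) := by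
  induction rest with
  | nil => intro p d prod h1 hk h2; simpa using ⟨h1, hk, h2⟩
  | cons x xs ih =>
    intro p d prod h1 hk h2
    obtain ⟨g1, gk, g2⟩ := step_inv t p x d prod h1 hk h2
    have hfold := ih (p ++ [x]) (stepA t (d, prod) x).1 (stepA t (d, prod) x).2 g1 gk g2
    simpa using hfold

def good (t : Int) (skill : List Int) : Prop :=
  ∀ x ∈ skill, (skill.count (t - x) : Int) = (skill.count x : Int) ∧
    (x = t - x → ((skill.count x : Int)) % 2 = 0)

lemma leftv_zero_iff_good (t : Int) (skill : List Int) :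
    (∀ v, leftv t skill v = 0) ↔ good t skill := by
  constructor
  · intro h x hx
    have hx1 := h x
    have hx2 := h (t - x)
    unfold leftv at hx1 hx2
    by_cases hm : x = t - x
    · rw [if_pos (by omega)] at hx1
      exact ⟨by rw [← hm], fun _ => hx1⟩
    · rw [if_neg (by omega)] at hx1
      rw [if_neg (by omega), show t - (t - x) = x by ring] at hx2
      refine ⟨by omega, fun hc => absurd hc hm⟩
  · intro hg v
    unfold leftv
    by_cases hv : v ∈ skill
    · obtain ⟨h1, h2⟩ := hg v hv
      split_ifs with hm
      · exact h2 (by omega)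
      · omega
    · have hc : skill.count v = 0 := List.count_eq_zero.mpr hv
      split_ifs with hm <;> simp [hc]

lemma altCheck_iff (t : Int) (cnt : PySem.Dict Int Int) (skill : List Int)
    (hc : ∀ v, cnt.getD v 0 = (skill.count v : Int)) (l : List Int) :
    altCheck t cnt l = true ↔
      ∀ x ∈ l, (skill.count (t - x) : Int) = (skill.count x : Int) ∧
        (x = t - x → ((skill.count x : Int)) % 2 = 0) := by
  induction l with
  | nil => simp [altCheck]
  | cons x rest ih =>
    unfold altCheck
    rw [hc, hc, PySem.Int.mod_eq_emod_of_pos (by norm_num : (0:Int) < 2)]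
    split_ifs with hcond
    · simp only [false_iff]
      intro hall
      obtain ⟨h1, h2⟩ := hall x (List.mem_cons_self)
      rcases hcond with hne | ⟨hm, hodd⟩
      · exact hne h1
      · have := h2 hm
        omega
    · rw [not_or, not_and_or] at hcond
      obtain ⟨hc1, hc2⟩ := hcond
      rw [not_not] at hc1
      simp only [List.mem_cons, forall_eq_or_imp, ih, iff_def]
      constructor
      · intro hrest
        refine ⟨⟨hc1, fun hm => ?_⟩, hrest⟩
        rcases hc2 with h | h
        · exact absurd hm h
        · have hnn : (0:Int) ≤ (skill.count x : Int) := by positivity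
          have := PySem.Int.mod_eq_emod_of_pos (by norm_num : (0:Int) < 2)
            (a := cnt.getD x 0)
          omega
      · intro h; exact h.2

-- ===== VERDICT (by name: the statement is the Claim_ definition above) =====
theorem set_approach_spec : Claim_equal_set_approach := by
  intro skill _ hpre
  unfold Spec_set_approach set_approach set_approach_alt
  cases hmx : PySem.List.max? skill (fun x => x) with
  | none => exact absurd ((PySem.List.max?_eq_none_iff skill _).mp hmx) hpre
  | some mx =>
  cases hmn : PySem.List.min? skill (fun x => x) with
  | none => exact absurd ((PySem.List.min?_eq_none_iff skill _).mp hmn) hpre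
  | some mn =>
  simp only []
  obtain ⟨h1F, hkF, h2F⟩ := by
    have h0 : ∀ v, (PySem.Dict.empty : PySem.Dict Int Int).getD v 0 = leftv (mx + mn) [] v := by
      intro v; rw [PySem.Dict.getD_empty]; simp [leftv]
    have hk0 : (PySem.Dict.empty : PySem.Dict Int Int).keys.Nodup := by
      rw [PySem.Dict.keys_empty]; exact List.nodup_nil
    have h20 : 2 * (0:Int) + wk (mx + mn) PySem.Dict.empty = sprod (mx + mn) [] := by
      simp [wk, sprod, PySem.Dict.keys_empty]
    have := fold_inv (mx + mn) skill [] PySem.Dict.empty 0 h0 hk0 h20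
    simpa using this
  have hcnt : ∀ v, (skill.foldl (fun (d : PySem.Dict Int Int) x => d.insert x (d.getD x 0 + 1))
      PySem.Dict.empty).getD v 0 = (skill.count v : Int) := by
    intro v
    rw [PySem.Dict.getD_foldl_insert_add_one, PySem.Dict.getD_empty]
    ring
  have hAC := altCheck_iff (mx + mn) _ skill hcnt skill
  have hgoods := leftv_zero_iff_good (mx + mn) skill
  have hvals : ((skill.foldl (stepA (mx + mn)) (PySem.Dict.empty, 0)).1.values.all
      (fun v => v == 0) = true) ↔ ∀ v, leftv (mx + mn) skill v = 0 := by
    rw [PySem.Dict.values_eq_map_keys _ hkF 0, List.all_map]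
    constructor
    · intro hall v
      by_cases hc : (skill.foldl (stepA (mx + mn)) (PySem.Dict.empty, 0)).1.contains v = true
      · have hmem := (PySem.Dict.contains_iff_mem_keys _ v).mp hc
        have := List.all_eq_true.mp hall v hmem
        rw [← h1F v]
        simpa using this
      · rw [← h1F v, PySem.Dict.getD_of_not_contains _ 0 (by simpa using hc)]
    · intro hz
      apply List.all_eq_true.mpr
      intro w _
      simp only [Function.comp]
      rw [h1F w, hz w]
      rfl
  by_cases hgood : ∀ v, leftv (mx + mn) skill v = 0
  · rw [if_pos (hvals.mpr hgood), if_pos (hAC.mpr (hgoods.mp hgood))]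
    have hwk0 : wk (mx + mn) (skill.foldl (stepA (mx + mn)) (PySem.Dict.empty, 0)).1 = 0 := by
      unfold wk
      rw [List.map_congr_left (fun k _ => by rw [h1F k, hgood k]; ring :
        ∀ k ∈ (skill.foldl (stepA (mx + mn)) (PySem.Dict.empty, 0)).1.keys,
          k * ((mx + mn) - k) * (skill.foldl (stepA (mx + mn)) (PySem.Dict.empty, 0)).1.getD k 0 = 0)]
      simp
    have h2 : 2 * (skill.foldl (stepA (mx + mn)) (PySem.Dict.empty, 0)).2 = sprod (mx + mn) skill := by
      rw [← h2F, hwk0]; ring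
    rw [show (skill.map (fun x => x * ((mx + mn) - x))).sum = sprod (mx + mn) skill from rfl, ← h2]
    rw [PySem.Int.floordiv_eq_ediv_of_pos (by norm_num : (0:Int) < 2)]
    omega
  · rw [if_neg (fun hc => hgood (hvals.mp hc)),
      if_neg (fun hc => hgood (hgoods.mpr (hAC.mp hc)))]
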